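-- pv_equiv track=rewrite | github.com/aradfarahani/LeetCode | 391. Perfect Rectangle.py | isRectangleCover
-- ===== SOURCE A (Python) =====
-- def isRectangleCover(rectangles):
--     def add_point(point):
--         if point in points:
--             points.remove(point)
--         else:
--             points.add(point)
--
--     points = set()
--     area = 0
--     min_x = min_y = float('inf')
--     max_x = max_y = float('-inf')
--
--     for x1, y1, x2, y2 in rectangles:
--         area += (x2 - x1) * (y2 - y1)
--         min_x = min(min_x, x1)
--         min_y = min(min_y, y1)
--         max_x = max(max_x, x2)
--         max_y = max(max_y, y2)
--
--         add_point((x1, y1))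
--         add_point((x1, y2))
--         add_point((x2, y1))
--         add_point((x2, y2))
--
--     if (min_x, min_y) not in points or (min_x, max_y) not in points or (max_x, min_y) not in points or (max_x, max_y) not in points or len(points) != 4:
--         return False
--
--     return area == (max_x - min_x) * (max_y - min_y)
-- ===== SOURCE B (Python) =====
-- def isRectangleCover(rectangles):
--     # Staged passes: bounds and area by separate reductions; corner parity by
--     # sort + run-length scan over the flat corner list (no hash set/dict).
--     if not rectangles:
--         return False
--     min_x = min(r[0] for r in rectangles)
--     min_y = min(r[1] for r in rectangles)
--     max_x = max(r[2] for r in rectangles)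
--     max_y = max(r[3] for r in rectangles)
--     area = sum((r[2] - r[0]) * (r[3] - r[1]) for r in rectangles)
--
--     corners = sorted(c for r in rectangles
--                      for c in ((r[0], r[1]), (r[0], r[3]), (r[2], r[1]), (r[2], r[3])))
--     odd = []
--     i = 0
--     n = len(corners)
--     while i < n:
--         j = i
--         while j < n and corners[j] == corners[i]:
--             j += 1
--         if (j - i) % 2 == 1:
--             odd.append(corners[i])
--         i = j
--
--     corners4 = ((min_x, min_y), (min_x, max_y), (max_x, min_y), (max_x, max_y))
--     return (len(odd) == 4 and all(c in odd for c in corners4)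
--             and area == (max_x - min_x) * (max_y - min_y))
-- ===== Notes on version B (the rewrite author's own statement) =====
-- stated objective: alternative
-- what changed: B drops A's single toggling-set loop entirely: it computes bounds and area by separate min/max/sum reductions and finds the odd-multiplicity corners by flattening all corners into one list, sorting it, and doing a run-length scan over equal runs (no hash set/dict at all).
import Mathlib
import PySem

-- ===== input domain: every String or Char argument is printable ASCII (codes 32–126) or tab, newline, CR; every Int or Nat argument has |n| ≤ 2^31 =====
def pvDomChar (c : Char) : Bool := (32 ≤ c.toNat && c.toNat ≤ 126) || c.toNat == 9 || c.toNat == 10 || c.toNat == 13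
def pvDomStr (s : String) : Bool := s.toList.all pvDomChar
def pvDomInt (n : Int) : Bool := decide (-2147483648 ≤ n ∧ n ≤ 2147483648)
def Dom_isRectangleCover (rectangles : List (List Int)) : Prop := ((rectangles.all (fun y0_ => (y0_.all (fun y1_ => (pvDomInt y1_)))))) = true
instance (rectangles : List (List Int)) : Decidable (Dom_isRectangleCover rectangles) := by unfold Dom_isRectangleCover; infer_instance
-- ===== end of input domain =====

-- B replaces A's single toggling-set loop by staged reductions (min/max/sum comprehensions)
-- plus a sort-and-run-length scan that extracts the odd-multiplicity corners without any
-- hash set/dict (alternative decomposition, same asymptotic cost up to the sort).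

-- ===== PORT A =====

-- Python's float('inf')/-inf initial bounds carry `none`; min/max against an Int is exact
-- because every later value is an Int (none = still infinite, i.e. the empty loop).
def pvOMin (o : Option Int) (v : Int) : Option Int :=
  some (match o with | none => v | some m => min m v)

def pvOMax (o : Option Int) (v : Int) : Option Int :=
  some (match o with | none => v | some m => max m v)

-- unpack `x1, y1, x2, y2 = rect`; Pre_ guarantees length 4 (Python raises otherwise)
def pvUnpack4 (r : List Int) : Int × Int × Int × Int :=
  match r with
  | [a, b, c, d] => (a, b, c, d)
  | _ => (0, 0, 0, 0)

def pvAddPoint (points : PySem.Set (Int × Int)) (p : Int × Int) : PySem.Set (Int × Int) :=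
  if PySem.Set.contains points p then PySem.Set.discard points p else PySem.Set.add points p

def pvAStep (st : PySem.Set (Int × Int) × Int × Option Int × Option Int × Option Int × Option Int)
    (r : List Int) :
    PySem.Set (Int × Int) × Int × Option Int × Option Int × Option Int × Option Int :=
  let (points, area, mnx, mny, mxx, mxy) := st
  let (x1, y1, x2, y2) := pvUnpack4 r
  let area := area + (x2 - x1) * (y2 - y1)
  let mnx := pvOMin mnx x1
  let mny := pvOMin mny y1
  let mxx := pvOMax mxx x2
  let mxy := pvOMax mxy y2
  let points := pvAddPoint points (x1, y1)
  let points := pvAddPoint points (x1, y2)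
  let points := pvAddPoint points (x2, y1)
  let points := pvAddPoint points (x2, y2)
  (points, area, mnx, mny, mxx, mxy)

def isRectangleCover (rectangles : List (List Int)) : Bool :=
  let st := rectangles.foldl pvAStep (PySem.Set.empty, 0, none, none, none, none)
  let (points, area, mnx, mny, mxx, mxy) := st
  match mnx, mny, mxx, mxy with
  | some a, some b, some c, some d =>
      if !PySem.Set.contains points (a, b) || !PySem.Set.contains points (a, d)
          || !PySem.Set.contains points (c, b) || !PySem.Set.contains points (c, d)
          || PySem.Set.len points ≠ 4 then false
      else area == (c - a) * (d - b)
  | _, _, _, _ => false  -- rectangles = []: an infinite corner is never in `points`, Python returns False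

-- ===== PORT B =====

-- r[0]…r[3]; Pre_ guarantees the index is in range (Python would raise IndexError)
def pvB0 (r : List Int) : Int := (PySem.List.pyGet? r 0).getD 0
def pvB1 (r : List Int) : Int := (PySem.List.pyGet? r 1).getD 0
def pvB2 (r : List Int) : Int := (PySem.List.pyGet? r 2).getD 0
def pvB3 (r : List Int) : Int := (PySem.List.pyGet? r 3).getD 0

-- the four corner tuples contributed by one rectangle (B's inner generator)
def pvBQuad (r : List Int) : List (Int × Int) :=
  [(pvB0 r, pvB1 r), (pvB0 r, pvB3 r), (pvB2 r, pvB1 r), (pvB2 r, pvB3 r)]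

-- B's while-loop scan over the sorted corner list: the inner `while corners[j] == corners[i]`
-- advance is the takeWhile/dropWhile split of one equal run; exact for the index loop.
def pvScan : List (Int × Int) → List (Int × Int)
  | [] => []
  | p :: t =>
      (if (1 + (t.takeWhile (· == p)).length) % 2 = 1 then [p] else []) ++
        pvScan (t.dropWhile (· == p))
  termination_by l => l.length
  decreasing_by
    simp only [List.length_cons]
    exact Nat.lt_succ_of_le (List.dropWhile_sublist _).length_le

def isRectangleCover_alt (rectangles : List (List Int)) : Bool :=
  if rectangles.isEmpty then false
  else
    match PySem.List.min? (rectangles.map pvB0) (fun x => x) with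
    | none => false  -- unreachable: min/max of a nonempty list is some
    | some mnx =>
      match PySem.List.min? (rectangles.map pvB1) (fun x => x) with
      | none => false
      | some mny =>
        match PySem.List.max? (rectangles.map pvB2) (fun x => x) with
        | none => false
        | some mxx =>
          match PySem.List.max? (rectangles.map pvB3) (fun x => x) with
          | none => false
          | some mxy =>
            let area := (rectangles.map (fun r => (pvB2 r - pvB0 r) * (pvB3 r - pvB1 r))).sum
            -- sorted(corners): Python sorts the Int pairs lexicographically
            let corners := PySem.List.sorted2 (rectangles.flatMap pvBQuad) Prod.fst Prod.snd
            let odd := pvScan corners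
            (odd.length == 4)
              && [(mnx, mny), (mnx, mxy), (mxx, mny), (mxx, mxy)].all (fun c => decide (c ∈ odd))
              && (area == (mxx - mnx) * (mxy - mny))

-- ===== PRECONDITION & SPEC =====
-- Pre_ excludes exactly the rectangles of length ≠ 4, on which A's tuple unpacking raises ValueError.
def Pre_isRectangleCover (rectangles : List (List Int)) : Prop :=
  ∀ r ∈ rectangles, r.length = 4
instance (rectangles : List (List Int)) : Decidable (Pre_isRectangleCover rectangles) := by
  unfold Pre_isRectangleCover; infer_instance
def pvWitness_isRectangleCover : List (List Int) := [[0, 0, 1, 1], [1, 0, 2, 1]]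

def Spec_isRectangleCover (rectangles : List (List Int)) (out : Bool) : Prop := out = isRectangleCover_alt rectangles
instance (rectangles : List (List Int)) (out : Bool) : Decidable (Spec_isRectangleCover rectangles out) := by unfold Spec_isRectangleCover; infer_instance

-- ===== CLAIM (what is proved, stated in full; the proofs are below) =====
def Claim_equal_isRectangleCover : Prop := ∀ (rectangles : List (List Int)), Dom_isRectangleCover rectangles → Pre_isRectangleCover rectangles → Spec_isRectangleCover rectangles (isRectangleCover rectangles)


-- ===== LEMMAS AND PROOFS =====

-- A-side helper views used only in the proofs
def pvAQuad (r : List Int) : List (Int × Int) :=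
  [((pvUnpack4 r).1, (pvUnpack4 r).2.1), ((pvUnpack4 r).1, (pvUnpack4 r).2.2.2),
   ((pvUnpack4 r).2.2.1, (pvUnpack4 r).2.1), ((pvUnpack4 r).2.2.1, (pvUnpack4 r).2.2.2)]

def pvAArea (r : List Int) : Int :=
  ((pvUnpack4 r).2.2.1 - (pvUnpack4 r).1) * ((pvUnpack4 r).2.2.2 - (pvUnpack4 r).2.1)

-- Python's lexicographic order on Int pairs
def pvLexLe (a b : Int × Int) : Prop := a.1 < b.1 ∨ (a.1 = b.1 ∧ a.2 ≤ b.2)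

theorem pvLexLe_trans {a b c : Int × Int} (h : pvLexLe a b) (h' : pvLexLe b c) : pvLexLe a c := by
  unfold pvLexLe at *
  by_cases hx : a.1 < c.1
  · exact Or.inl hx
  · exact Or.inr ⟨by omega, by omega⟩

theorem pvLexLe_antisymm {a b : Int × Int} (h : pvLexLe a b) (h' : pvLexLe b a) : a = b := by
  unfold pvLexLe at *
  have h1 : a.1 = b.1 := by omega
  have h2 : a.2 = b.2 := by omega
  exact Prod.ext h1 h2

theorem pvLt_le (a b : Int × Int)
    (h : (decide (a.1 < b.1) || (!decide (b.1 < a.1) && decide (a.2 < b.2))) = true) :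
    pvLexLe a b := by
  simp only [Bool.or_eq_true, Bool.and_eq_true, Bool.not_eq_true', decide_eq_true_eq,
    decide_eq_false_iff_not] at h
  unfold pvLexLe
  by_cases hx : a.1 < b.1
  · exact Or.inl hx
  · exact Or.inr ⟨by omega, by omega⟩

theorem pvLt_not (a b : Int × Int)
    (h : (decide (a.1 < b.1) || (!decide (b.1 < a.1) && decide (a.2 < b.2))) = false) :
    pvLexLe b a := by
  simp only [Bool.or_eq_false_iff, Bool.and_eq_false_iff, Bool.not_eq_false',
    decide_eq_true_eq, decide_eq_false_iff_not] at h
  unfold pvLexLe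
  by_cases hx : b.1 < a.1
  · exact Or.inl hx
  · exact Or.inr ⟨by omega, by omega⟩

theorem pvInsertBy_pairwise (before : (Int × Int) → (Int × Int) → Bool)
    (h1 : ∀ a b, before a b = true → pvLexLe a b)
    (h2 : ∀ a b, before a b = false → pvLexLe b a) :
    ∀ (l : List (Int × Int)) (x : Int × Int), l.Pairwise pvLexLe →
      (PySem.List.insertBy before x l).Pairwise pvLexLe := by
  intro l
  induction l with
  | nil => intro x _; simp [PySem.List.insertBy]
  | cons y ys ih =>
    intro x hp
    obtain ⟨hy, hys⟩ := List.pairwise_cons.1 hp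
    by_cases hb : before x y = true
    · have hxy := h1 _ _ hb
      simp only [PySem.List.insertBy, hb, if_true]
      refine List.pairwise_cons.2 ⟨?_, List.pairwise_cons.2 ⟨hy, hys⟩⟩
      intro z hz
      rcases List.mem_cons.1 hz with rfl | hz
      · exact hxy
      · exact pvLexLe_trans hxy (hy z hz)
    · have hyx := h2 _ _ (by simpa using hb)
      simp only [PySem.List.insertBy, hb]
      refine List.pairwise_cons.2 ⟨?_, ih x hys⟩
      intro z hz
      rcases (PySem.List.mem_insertBy _ _ _ _).1 hz with rfl | hz
      · exact hyx
      · exact hy z hz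

theorem pvSorted2_pairwise (xs : List (Int × Int)) :
    (PySem.List.sorted2 xs Prod.fst Prod.snd).Pairwise pvLexLe := by
  have key : ∀ (l acc : List (Int × Int)), acc.Pairwise pvLexLe →
      (l.foldl (fun acc x => PySem.List.insertBy
        (fun a b => decide (a.1 < b.1) || (!decide (b.1 < a.1) && decide (a.2 < b.2))) x acc)
        acc).Pairwise pvLexLe := by
    intro l
    induction l with
    | nil => intro acc h; exact h
    | cons x l ih =>
      intro acc h
      exact ih _ (pvInsertBy_pairwise _ pvLt_le pvLt_not acc x h)
  have hdef : PySem.List.sorted2 xs Prod.fst Prod.snd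
      = xs.foldl (fun acc x => PySem.List.insertBy
          (fun a b => decide (a.1 < b.1) || (!decide (b.1 < a.1) && decide (a.2 < b.2))) x acc)
          [] := rfl
  rw [hdef]
  exact key xs [] List.Pairwise.nil

-- A's toggling set: membership flips with each occurrence (parity invariant)
theorem pvMem_addPoint (pts : PySem.Set (Int × Int)) (q p : Int × Int) :
    p ∈ pvAddPoint pts q ↔ (if p = q then ¬ p ∈ pts else p ∈ pts) := by
  unfold pvAddPoint
  by_cases hc : PySem.Set.contains pts q = true
  · have hq : q ∈ pts := (PySem.Set.contains_iff pts q).1 hc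
    rw [if_pos hc, PySem.Set.mem_discard]
    by_cases hpq : p = q
    · subst hpq; simp [hq]
    · simp [hpq]
  · have hq : q ∉ pts := fun h => hc ((PySem.Set.contains_iff pts q).2 h)
    rw [if_neg hc, PySem.Set.mem_add]
    by_cases hpq : p = q
    · subst hpq; simp [hq]
    · simp [hpq]

theorem pvNodup_addPoint (pts : PySem.Set (Int × Int)) (q : Int × Int) (h : pts.Nodup) :
    (pvAddPoint pts q).Nodup := by
  unfold pvAddPoint
  split
  · exact PySem.Set.nodup_discard pts q h
  · exact PySem.Set.nodup_add pts q h

theorem pvToggle_mem (ps : List (Int × Int)) :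
    ∀ (s : PySem.Set (Int × Int)) (x : Int × Int),
      x ∈ ps.foldl pvAddPoint s ↔ ((x ∈ s) ↔ ps.count x % 2 = 0) := by
  induction ps with
  | nil => intro s x; simp
  | cons q tl ih =>
    intro s x
    rw [List.foldl_cons, ih (pvAddPoint s q) x, pvMem_addPoint]
    by_cases hxq : x = q
    · subst hxq
      rw [List.count_cons_self, if_pos rfl]
      have hpar : (tl.count x + 1) % 2 = 0 ↔ ¬ tl.count x % 2 = 0 := by omega
      rw [hpar]
      tauto
    · rw [List.count_cons_of_ne (fun h => hxq h.symm), if_neg hxq]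

theorem pvToggle_nodup (ps : List (Int × Int)) :
    ∀ (s : PySem.Set (Int × Int)), s.Nodup → (ps.foldl pvAddPoint s).Nodup := by
  induction ps with
  | nil => intro s h; exact h
  | cons q tl ih => intro s h; exact ih _ (pvNodup_addPoint s q h)

-- A's single loop splits into independent staged reductions
theorem pvA_decomp (rects : List (List Int)) :
    ∀ (s : PySem.Set (Int × Int)) (a : Int) (m1 m2 m3 m4 : Option Int),
      rects.foldl pvAStep (s, a, m1, m2, m3, m4) =
        ((rects.flatMap pvAQuad).foldl pvAddPoint s,
         a + (rects.map pvAArea).sum,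
         rects.foldl (fun o r => pvOMin o (pvUnpack4 r).1) m1,
         rects.foldl (fun o r => pvOMin o (pvUnpack4 r).2.1) m2,
         rects.foldl (fun o r => pvOMax o (pvUnpack4 r).2.2.1) m3,
         rects.foldl (fun o r => pvOMax o (pvUnpack4 r).2.2.2) m4) := by
  induction rects with
  | nil => intro s a m1 m2 m3 m4; simp
  | cons r t ih =>
    intro s a m1 m2 m3 m4
    rcases hu : pvUnpack4 r with ⟨x1, y1, x2, y2⟩
    simp only [List.foldl_cons, pvAStep, hu]
    rw [ih]
    simp only [List.flatMap_cons, List.map_cons, List.sum_cons, List.foldl_append,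
      pvAQuad, pvAArea, hu, List.foldl_cons]
    refine congrArg₂ Prod.mk rfl (congrArg₂ Prod.mk ?_ rfl)
    ring

theorem pvOMin_fold (f : List Int → Int) (t : List (List Int)) :
    ∀ a : Int, t.foldl (fun o r => pvOMin o (f r)) (some a)
      = some ((t.map f).foldl min a) := by
  induction t with
  | nil => intro a; rfl
  | cons r tl ih =>
    intro a
    rw [List.foldl_cons, List.map_cons, List.foldl_cons]
    exact ih (min a (f r))

theorem pvOMax_fold (f : List Int → Int) (t : List (List Int)) :
    ∀ a : Int, t.foldl (fun o r => pvOMax o (f r)) (some a)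
      = some ((t.map f).foldl max a) := by
  induction t with
  | nil => intro a; rfl
  | cons r tl ih =>
    intro a
    rw [List.foldl_cons, List.map_cons, List.foldl_cons]
    exact ih (max a (f r))

theorem pvMin_link (f : List Int → Int) (r : List Int) (t : List (List Int)) :
    (r :: t).foldl (fun o rr => pvOMin o (f rr)) none
      = some ((t.map f).foldl min (f r)) := by
  rw [List.foldl_cons]
  exact pvOMin_fold f t (f r)

theorem pvMax_link (f : List Int → Int) (r : List Int) (t : List (List Int)) :
    (r :: t).foldl (fun o rr => pvOMax o (f rr)) none
      = some ((t.map f).foldl max (f r)) := by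
  rw [List.foldl_cons]
  exact pvOMax_fold f t (f r)

theorem pvUnpack_eq (r : List Int) (h : r.length = 4) :
    pvUnpack4 r = (pvB0 r, pvB1 r, pvB2 r, pvB3 r) := by
  rcases r with _ | ⟨a, _ | ⟨b, _ | ⟨c, _ | ⟨d, _ | ⟨e, tl⟩⟩⟩⟩⟩ <;> simp_all
  rfl

-- the run-length scan returns each corner value inside l at most once
theorem pvScan_subset : ∀ (l : List (Int × Int)), ∀ x ∈ pvScan l, x ∈ l := by
  intro l
  induction l using pvScan.induct with
  | case1 => intro x hx; simp [pvScan] at hx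
  | case2 p t ih =>
    intro x hx
    simp only [pvScan, List.mem_append] at hx
    rcases hx with hx | hx
    · have hxp : x = p := by split at hx <;> simp_all
      simp [hxp]
    · exact List.mem_cons_of_mem _ ((List.dropWhile_sublist _).subset (ih x hx))

-- on a lex-sorted list the scan yields exactly the odd-count values, without repetition
theorem pvScan_spec : ∀ (l : List (Int × Int)), l.Pairwise pvLexLe →
    (pvScan l).Nodup ∧ (∀ x, x ∈ pvScan l ↔ l.count x % 2 = 1) := by
  intro l
  induction l using pvScan.induct with
  | case1 =>
    intro _
    refine ⟨by simp [pvScan], fun x => by simp [pvScan]⟩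
  | case2 p t ih =>
    intro hp
    obtain ⟨hpt, htp⟩ := List.pairwise_cons.1 hp
    have hdwp : (t.dropWhile (· == p)).Pairwise pvLexLe :=
      List.Pairwise.sublist (List.dropWhile_sublist _) htp
    have hnot : p ∉ t.dropWhile (· == p) := by
      intro hmem
      cases hdw : t.dropWhile (· == p) with
      | nil => rw [hdw] at hmem; simp at hmem
      | cons q rest =>
        have hqp : (q == p) = false := by
          have h := List.head?_dropWhile_not (· == p) t
          rw [hdw] at h
          simpa using h
        have hqnep : q ≠ p := by simpa using hqp
        rw [hdw] at hmem
        rcases List.mem_cons.1 hmem with heq | hmem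
        · exact hqnep heq.symm
        · have hq_le_p : pvLexLe q p := (List.pairwise_cons.1 (hdw ▸ hdwp)).1 p hmem
          have hq_in_t : q ∈ t :=
            (List.dropWhile_sublist (· == p)).subset (by rw [hdw]; exact List.mem_cons_self)
          exact hqnep (pvLexLe_antisymm hq_le_p (hpt q hq_in_t))
    obtain ⟨ihnd, ihmem⟩ := ih hdwp
    have hsplit : t = t.takeWhile (· == p) ++ t.dropWhile (· == p) :=
      (List.takeWhile_append_dropWhile).symm
    have htw : ∀ y ∈ t.takeWhile (· == p), y = p := fun y hy => by
      simpa using List.mem_takeWhile_imp hy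
    have hcnt_tw : (t.takeWhile (· == p)).count p = (t.takeWhile (· == p)).length :=
      List.count_eq_length.2 (fun b hb => (htw b hb).symm)
    have hcnt_dw : (t.dropWhile (· == p)).count p = 0 := List.count_eq_zero.2 hnot
    have hpscan : p ∉ pvScan (t.dropWhile (· == p)) := fun h => hnot (pvScan_subset _ p h)
    constructor
    · simp only [pvScan]
      split
      · simpa using ⟨hpscan, ihnd⟩
      · simpa using ihnd
    · intro x
      simp only [pvScan, List.mem_append]
      by_cases hxp : x = p
      · subst hxp
        have hcx : (x :: t).count x = 1 + (t.takeWhile (· == x)).length := by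
          rw [List.count_cons_self]
          conv_lhs => rw [hsplit]
          rw [List.count_append, hcnt_tw, hcnt_dw]
          omega
        rw [hcx]
        by_cases hc : (1 + (t.takeWhile (· == x)).length) % 2 = 1 <;> simp [hc, hpscan]
      · have hxtw : (t.takeWhile (· == p)).count x = 0 :=
          List.count_eq_zero.2 (fun hx => hxp (htw x hx))
        have hcx : (p :: t).count x = (t.dropWhile (· == p)).count x := by
          rw [List.count_cons_of_ne (fun h => hxp h.symm)]
          conv_lhs => rw [hsplit]
          rw [List.count_append, hxtw]
          omega
        rw [hcx, ← ihmem x]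
        have hni : x ∉ (if (1 + (t.takeWhile (· == p)).length) % 2 = 1
            then [p] else ([] : List (Int × Int))) := by
          split <;> simp [hxp]
        exact or_iff_right hni

-- the two final corner checks agree once membership and cardinality agree
theorem pvFinal_eq (pts odd : List (Int × Int))
    (hmem : ∀ x, x ∈ pts ↔ x ∈ odd) (hlen : pts.length = odd.length)
    (a b c d area : Int) :
    (if !PySem.Set.contains pts (a, b) || !PySem.Set.contains pts (a, d)
        || !PySem.Set.contains pts (c, b) || !PySem.Set.contains pts (c, d)
        || PySem.Set.len pts ≠ 4 then false
     else area == (c - a) * (d - b))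
    = ((odd.length == 4)
        && [((a, b)), ((a, d)), ((c, b)), ((c, d))].all (fun p => decide (p ∈ odd))
        && (area == (c - a) * (d - b))) := by
  have hcast : ((odd.length : Int) = 4) ↔ (odd.length = 4) := by omega
  by_cases h1 : (a, b) ∈ odd <;> by_cases h2 : (a, d) ∈ odd <;>
    by_cases h3 : (c, b) ∈ odd <;> by_cases h4 : (c, d) ∈ odd <;>
    by_cases hl : odd.length = 4 <;>
    simp [PySem.Set.len, hmem, h1, h2, h3, h4, hlen, hcast, hl]

-- ===== VERDICT (by name: the statement is the Claim_ definition above) =====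
theorem isRectangleCover_spec : Claim_equal_isRectangleCover := by
  intro rects _ hpre
  unfold Spec_isRectangleCover
  cases rects with
  | nil => rfl
  | cons r t =>
    have hm1 : (r :: t).foldl (fun o rr => pvOMin o (pvUnpack4 rr).1) none
        = some ((t.map pvB0).foldl min (pvB0 r)) := by
      rw [PySem.List.foldl_congr_mem _ _ (fun o rr => pvOMin o (pvB0 rr)) _
        (fun acc x hx => by rw [pvUnpack_eq x (hpre x hx)])]
      exact pvMin_link pvB0 r t
    have hm2 : (r :: t).foldl (fun o rr => pvOMin o (pvUnpack4 rr).2.1) none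
        = some ((t.map pvB1).foldl min (pvB1 r)) := by
      rw [PySem.List.foldl_congr_mem _ _ (fun o rr => pvOMin o (pvB1 rr)) _
        (fun acc x hx => by rw [pvUnpack_eq x (hpre x hx)])]
      exact pvMin_link pvB1 r t
    have hm3 : (r :: t).foldl (fun o rr => pvOMax o (pvUnpack4 rr).2.2.1) none
        = some ((t.map pvB2).foldl max (pvB2 r)) := by
      rw [PySem.List.foldl_congr_mem _ _ (fun o rr => pvOMax o (pvB2 rr)) _
        (fun acc x hx => by rw [pvUnpack_eq x (hpre x hx)])]
      exact pvMax_link pvB2 r t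
    have hm4 : (r :: t).foldl (fun o rr => pvOMax o (pvUnpack4 rr).2.2.2) none
        = some ((t.map pvB3).foldl max (pvB3 r)) := by
      rw [PySem.List.foldl_congr_mem _ _ (fun o rr => pvOMax o (pvB3 rr)) _
        (fun acc x hx => by rw [pvUnpack_eq x (hpre x hx)])]
      exact pvMax_link pvB3 r t
    have hcs : (r :: t).flatMap pvAQuad = (r :: t).flatMap pvBQuad :=
      List.flatMap_congr (fun x hx => by
        simp [pvAQuad, pvBQuad, pvUnpack_eq x (hpre x hx)])
    have harea : (r :: t).map pvAArea
        = (r :: t).map (fun rr => (pvB2 rr - pvB0 rr) * (pvB3 rr - pvB1 rr)) :=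
      List.map_congr_left (fun x hx => by
        simp [pvAArea, pvUnpack_eq x (hpre x hx)])
    -- membership / cardinality bridge
    have hsorted := pvSorted2_pairwise ((r :: t).flatMap pvBQuad)
    obtain ⟨hoddnd, hoddmem⟩ := pvScan_spec _ hsorted
    have hptsmem : ∀ x, x ∈ ((r :: t).flatMap pvBQuad).foldl pvAddPoint PySem.Set.empty
        ↔ ((r :: t).flatMap pvBQuad).count x % 2 = 1 := by
      intro x
      rw [pvToggle_mem]
      simp only [PySem.Set.empty, List.not_mem_nil, false_iff]
      omega
    have hmem : ∀ x, x ∈ ((r :: t).flatMap pvBQuad).foldl pvAddPoint PySem.Set.empty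
        ↔ x ∈ pvScan (PySem.List.sorted2 ((r :: t).flatMap pvBQuad) Prod.fst Prod.snd) := by
      intro x
      rw [hptsmem x, hoddmem x,
        (PySem.List.sorted2_perm ((r :: t).flatMap pvBQuad) Prod.fst Prod.snd false).count_eq]
    have hptsnd : (((r :: t).flatMap pvBQuad).foldl pvAddPoint PySem.Set.empty).Nodup :=
      pvToggle_nodup _ _ List.nodup_nil
    have hlen : (((r :: t).flatMap pvBQuad).foldl pvAddPoint PySem.Set.empty).length
        = (pvScan (PySem.List.sorted2 ((r :: t).flatMap pvBQuad) Prod.fst Prod.snd)).length :=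
      ((List.perm_ext_iff_of_nodup hptsnd hoddnd).2 hmem).length_eq
    -- evaluate both ports
    unfold isRectangleCover isRectangleCover_alt
    rw [pvA_decomp, hcs, harea, hm1, hm2, hm3, hm4]
    simp only [List.isEmpty_cons, Bool.false_eq_true, if_false, List.map_cons,
      PySem.List.min?_id_cons, PySem.List.max?_id_cons, zero_add]
    exact pvFinal_eq _ _ hmem hlen _ _ _ _ _
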